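-- pv_equiv track=rewrite | github.com/CySpiegel/CS5400-Into-To-Artificial-Intelligence | 2020-sp-101-game-1-mssgwb-master/Joueur.py/games/chess/functions.py | uciToCoordinates
-- ===== SOURCE A (Python) =====
-- CHESS_RANK = ["a", "b", "c", "d", "e", "f", "g", "h"]
--
-- CHESS_FILE = ["1", "2", "3", "4", "5", "6", "7", "8"]
--
-- def uciToCoordinates(uciString):
--     cRank = uciString[0]
--     cFile = uciString[1]
--     row = -1
--     col = -1
--     for i in range(8):
--         if CHESS_RANK[i] == cRank:
--             row = i
--         if CHESS_FILE[i] == cFile: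
--             col = i
--     return (row, col)
-- ===== SOURCE B (Python) =====
-- def uciToCoordinates(uciString):
--     r = ord(uciString[0]) - ord("a")
--     c = ord(uciString[1]) - ord("1")
--     return (r if 0 <= r < 8 else -1, c if 0 <= c < 8 else -1)
-- ===== Notes on version B (the rewrite author's own statement) =====
-- stated objective: idiomatic
-- what changed: Replaces the 8-iteration scan over the rank/file lists with closed-form character arithmetic (ord-based offsets with a range check), keeping the -1 default for out-of-range characters.
import Mathlib
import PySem

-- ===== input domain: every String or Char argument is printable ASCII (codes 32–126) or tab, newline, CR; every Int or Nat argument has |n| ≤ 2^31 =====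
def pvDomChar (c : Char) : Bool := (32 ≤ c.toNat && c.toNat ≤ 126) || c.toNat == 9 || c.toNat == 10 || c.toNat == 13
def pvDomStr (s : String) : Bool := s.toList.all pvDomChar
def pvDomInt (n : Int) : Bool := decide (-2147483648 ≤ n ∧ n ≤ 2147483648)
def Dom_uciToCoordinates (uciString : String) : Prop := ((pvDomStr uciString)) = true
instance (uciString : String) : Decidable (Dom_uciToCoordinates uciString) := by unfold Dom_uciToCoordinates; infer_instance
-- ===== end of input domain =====

-- B replaces A's 8-iteration scan over the rank/file lists with closed-form character
-- arithmetic (ord offsets with a range check); objective: idiomatic/simpler.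

-- ===== PORT A =====
def chessRank : List Char := ['a','b','c','d','e','f','g','h']
def chessFile : List Char := ['1','2','3','4','5','6','7','8']

-- A: uciString[0]/uciString[1] raise IndexError on strings of length < 2 (excluded by Pre_);
-- then a for-loop over range(8) updating row/col defaults of -1.
def uciToCoordinates (uciString : String) : Int × Int :=
  match uciString.toList with
  | c0 :: c1 :: _ =>
      (PySem.List.pyRange 0 8 1).foldl (fun rc i =>
        (if PySem.List.pyGetD chessRank i ' ' = c0 then i else rc.1,
         if PySem.List.pyGetD chessFile i ' ' = c1 then i else rc.2)) (-1, -1)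
  | _ => (-1, -1)   -- unreachable under Pre_ (Python raises IndexError here)

-- ===== PORT B =====
def uciToCoordinates_alt (uciString : String) : Int × Int :=
  match PySem.Str.pyGet? uciString 0, PySem.Str.pyGet? uciString 1 with
  | some c0, some c1 =>
      let r : Int := (c0.toNat : Int) - 97
      let c : Int := (c1.toNat : Int) - 49
      (if 0 ≤ r ∧ r < 8 then r else -1, if 0 ≤ c ∧ c < 8 then c else -1)
  | _, _ => (-1, -1)   -- unreachable under Pre_ (Python raises IndexError here)

-- ===== PRECONDITION & SPEC =====
-- Pre_ excludes exactly the strings of length < 2, on which both Pythons raise IndexError.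
def Pre_uciToCoordinates (uciString : String) : Prop := 2 ≤ uciString.toList.length
instance (uciString : String) : Decidable (Pre_uciToCoordinates uciString) := by unfold Pre_uciToCoordinates; infer_instance
def pvWitness_uciToCoordinates : String := "e4"

def Spec_uciToCoordinates (uciString : String) (out : Int × Int) : Prop := out = uciToCoordinates_alt uciString
instance (uciString : String) (out : Int × Int) : Decidable (Spec_uciToCoordinates uciString out) := by unfold Spec_uciToCoordinates; infer_instance

-- ===== CLAIM (what is proved, stated in full; the proofs are below) =====
def Claim_equal_uciToCoordinates : Prop := ∀ (uciString : String), Dom_uciToCoordinates uciString → Pre_uciToCoordinates uciString → Spec_uciToCoordinates uciString (uciToCoordinates uciString)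

-- ===== LEMMAS AND PROOFS =====

theorem char_eq_iff_toNat (d c : Char) : (d = c) ↔ (c.toNat = d.toNat) := by
  constructor
  · rintro rfl; rfl
  · intro h
    exact (Char.ext (UInt32.toNat_inj.mp (show c.val.toNat = d.val.toNat from h))).symm

theorem rowFold_eq (c : Char) :
    ([0,1,2,3,4,5,6,7] : List Int).foldl
      (fun r i => if PySem.List.pyGetD chessRank i ' ' = c then i else r) (-1)
      = (if 0 ≤ (c.toNat:Int) - 97 ∧ (c.toNat:Int) - 97 < 8 then (c.toNat:Int) - 97 else -1) := by
  have ha : ('a':Char).toNat = 97 := by decide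
  have hb : ('b':Char).toNat = 98 := by decide
  have hc : ('c':Char).toNat = 99 := by decide
  have hd : ('d':Char).toNat = 100 := by decide
  have he : ('e':Char).toNat = 101 := by decide
  have hf : ('f':Char).toNat = 102 := by decide
  have hg : ('g':Char).toNat = 103 := by decide
  have hh : ('h':Char).toNat = 104 := by decide
  have g0 : PySem.List.pyGetD chessRank 0 ' ' = 'a' := by decide
  have g1 : PySem.List.pyGetD chessRank 1 ' ' = 'b' := by decide
  have g2 : PySem.List.pyGetD chessRank 2 ' ' = 'c' := by decide
  have g3 : PySem.List.pyGetD chessRank 3 ' ' = 'd' := by decide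
  have g4 : PySem.List.pyGetD chessRank 4 ' ' = 'e' := by decide
  have g5 : PySem.List.pyGetD chessRank 5 ' ' = 'f' := by decide
  have g6 : PySem.List.pyGetD chessRank 6 ' ' = 'g' := by decide
  have g7 : PySem.List.pyGetD chessRank 7 ' ' = 'h' := by decide
  simp only [List.foldl, g0, g1, g2, g3, g4, g5, g6, g7,
    char_eq_iff_toNat, ha, hb, hc, hd, he, hf, hg, hh]
  split_ifs <;> omega

theorem colFold_eq (c : Char) :
    ([0,1,2,3,4,5,6,7] : List Int).foldl
      (fun r i => if PySem.List.pyGetD chessFile i ' ' = c then i else r) (-1)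
      = (if 0 ≤ (c.toNat:Int) - 49 ∧ (c.toNat:Int) - 49 < 8 then (c.toNat:Int) - 49 else -1) := by
  have h1 : ('1':Char).toNat = 49 := by decide
  have h2 : ('2':Char).toNat = 50 := by decide
  have h3 : ('3':Char).toNat = 51 := by decide
  have h4 : ('4':Char).toNat = 52 := by decide
  have h5 : ('5':Char).toNat = 53 := by decide
  have h6 : ('6':Char).toNat = 54 := by decide
  have h7 : ('7':Char).toNat = 55 := by decide
  have h8 : ('8':Char).toNat = 56 := by decide
  have g0 : PySem.List.pyGetD chessFile 0 ' ' = '1' := by decide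
  have g1 : PySem.List.pyGetD chessFile 1 ' ' = '2' := by decide
  have g2 : PySem.List.pyGetD chessFile 2 ' ' = '3' := by decide
  have g3 : PySem.List.pyGetD chessFile 3 ' ' = '4' := by decide
  have g4 : PySem.List.pyGetD chessFile 4 ' ' = '5' := by decide
  have g5 : PySem.List.pyGetD chessFile 5 ' ' = '6' := by decide
  have g6 : PySem.List.pyGetD chessFile 6 ' ' = '7' := by decide
  have g7 : PySem.List.pyGetD chessFile 7 ' ' = '8' := by decide
  simp only [List.foldl, g0, g1, g2, g3, g4, g5, g6, g7,
    char_eq_iff_toNat, h1, h2, h3, h4, h5, h6, h7, h8]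
  split_ifs <;> omega

-- ===== VERDICT (by name: the statement is the Claim_ definition above) =====
theorem uciToCoordinates_spec : Claim_equal_uciToCoordinates := by
  intro s _ hpre
  unfold Spec_uciToCoordinates uciToCoordinates uciToCoordinates_alt
  have hr : PySem.List.pyRange 0 8 1 = ([0,1,2,3,4,5,6,7] : List Int) := by decide
  match hm : s.toList with
  | [] => simp [Pre_uciToCoordinates, hm] at hpre
  | [c] => simp [Pre_uciToCoordinates, hm] at hpre
  | c0 :: c1 :: rest =>
    have hn0 : (0:Int) ≤ (rest.length:Int) + 1 := by positivity
    have g0 : PySem.Str.pyGet? s 0 = some c0 := by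
      simp [PySem.Str.pyGet?, PySem.List.pyGet?, PySem.List.pyIdx?, hm, hn0]
    have g1 : PySem.Str.pyGet? s 1 = some c1 := by
      simp [PySem.Str.pyGet?, PySem.List.pyGet?, PySem.List.pyIdx?, hm]
    simp only [hr, g0, g1]
    rw [PySem.List.foldl_prod_mk
      (f := fun r i => if PySem.List.pyGetD chessRank i ' ' = c0 then i else r)
      (g := fun r i => if PySem.List.pyGetD chessFile i ' ' = c1 then i else r)]
    rw [rowFold_eq, colFold_eq]
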